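-- pv_equiv track=rewrite | github.com/vineetm/tensorflow | tensorflow/models/rnn/translate/candidate_scorer.py | get_phrase
-- ===== SOURCE A (Python) =====
-- def get_phrase(tokens, start_index, max_len, phrases):
--   for index in range(max_len):
--     phrase_len = max_len - index
--     if phrase_len == 1:
--       return tokens[start_index], 1
--
--     phrase = ' '.join(tokens[start_index: start_index + phrase_len])
--     if phrase in phrases:
--       return '_'.join(tokens[start_index: start_index + phrase_len]), phrase_len
-- ===== SOURCE B (Python) =====
-- def get_phrase(tokens, start_index, max_len, phrases):
--   best = 0
--   for length in range(2, max_len + 1):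
--     if ' '.join(tokens[start_index: start_index + length]) in phrases:
--       best = length
--   if best:
--     return '_'.join(tokens[start_index: start_index + best]), best
--   return tokens[start_index], 1
-- ===== Notes on version B (the rewrite author's own statement) =====
-- stated objective: alternative
-- what changed: A tries each phrase length longest-first with an early return, joining and membership-testing inside a descending loop with the length-1 case special-cased in the loop body; B makes one ascending pass over lengths 2..max_len recording the largest matching length, then builds the '_'-joined result (or the unconditional length-1 fallback) once after the loop.
-- outside the precondition, e.g. on get_phrase([], 0, 2, {''}): A returns ('', 2), B returns ('', 2); on get_phrase(['a'], 0, 0, {'a'}): A returns None, B returns ('a', 1)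
import Mathlib
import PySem

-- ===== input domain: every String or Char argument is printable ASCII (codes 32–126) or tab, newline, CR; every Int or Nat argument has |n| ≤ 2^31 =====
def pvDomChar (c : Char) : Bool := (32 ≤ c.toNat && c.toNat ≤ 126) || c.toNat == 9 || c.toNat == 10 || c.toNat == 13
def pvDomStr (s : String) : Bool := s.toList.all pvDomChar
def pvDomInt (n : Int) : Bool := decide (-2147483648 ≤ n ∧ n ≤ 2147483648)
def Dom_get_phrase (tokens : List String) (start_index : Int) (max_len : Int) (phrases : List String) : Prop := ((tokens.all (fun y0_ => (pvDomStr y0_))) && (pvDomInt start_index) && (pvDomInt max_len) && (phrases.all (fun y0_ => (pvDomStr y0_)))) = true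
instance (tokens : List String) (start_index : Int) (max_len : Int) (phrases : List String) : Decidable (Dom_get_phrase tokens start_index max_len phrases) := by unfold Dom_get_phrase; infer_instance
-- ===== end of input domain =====

-- B replaces A's longest-first early-return scan by one forward pass that records the largest
-- matching phrase length and builds the result once at the end (alternative decomposition).

-- ===== PORT A =====
-- for index in range(max_len): … with early returns; exhausting the loop (max_len ≤ 0) returns
-- Python None, modelled by the unreachable ("", 0) and excluded by Pre_.
def getPhraseLoopA (tokens : List String) (s m : Int) (phrases : List String) : List Int → String × Int
  | [] => ("", 0)
  | index :: rest =>
    let phrase_len := m - index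
    if phrase_len = 1 then
      ((PySem.List.pyGet? tokens s).getD "", 1)
    else
      let seg := PySem.List.slice tokens (some s) (some (s + phrase_len))
      if PySem.Str.join " " seg ∈ phrases then
        (PySem.Str.join "_" seg, phrase_len)
      else
        getPhraseLoopA tokens s m phrases rest

def get_phrase (tokens : List String) (start_index : Int) (max_len : Int) (phrases : List String) : String × Int :=
  getPhraseLoopA tokens start_index max_len phrases (PySem.List.pyRange 0 max_len 1)

-- ===== PORT B =====
def get_phrase_alt (tokens : List String) (start_index : Int) (max_len : Int) (phrases : List String) : String × Int :=
  let best := (PySem.List.pyRange 2 (max_len + 1) 1).foldl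
    (fun best l =>
      if PySem.Str.join " " (PySem.List.slice tokens (some start_index) (some (start_index + l))) ∈ phrases
      then l else best)
    0
  if best ≠ 0 then
    (PySem.Str.join "_" (PySem.List.slice tokens (some start_index) (some (start_index + best))), best)
  else
    ((PySem.List.pyGet? tokens start_index).getD "", 1)

-- ===== PRECONDITION & SPEC =====
-- Pre_ excludes (a) max_len ≤ 0, where A falls off its loop and returns None (no String × Int
-- value), and (b) start_index out of Python's index range, where the length-1 fallback
-- tokens[start_index] raises IndexError; on the rare such inputs where a longer phrase still
-- matches (so A returns before raising), A and B return the same value (see cites).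
def Pre_get_phrase (tokens : List String) (start_index : Int) (max_len : Int) (phrases : List String) : Prop :=
  1 ≤ max_len ∧ PySem.Raise.InRange tokens.length start_index
instance (tokens : List String) (start_index : Int) (max_len : Int) (phrases : List String) : Decidable (Pre_get_phrase tokens start_index max_len phrases) := by unfold Pre_get_phrase; infer_instance

def pvWitness_get_phrase : List String × Int × Int × List String :=
  (["the", "big", "dog"], 0, 3, ["big dog", "the big"])

def Spec_get_phrase (tokens : List String) (start_index : Int) (max_len : Int) (phrases : List String) (out : String × Int) : Prop := out = get_phrase_alt tokens start_index max_len phrases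
instance (tokens : List String) (start_index : Int) (max_len : Int) (phrases : List String) (out : String × Int) : Decidable (Spec_get_phrase tokens start_index max_len phrases out) := by unfold Spec_get_phrase; infer_instance

-- ===== CLAIM (what is proved, stated in full; the proofs are below) =====
def Claim_equal_get_phrase : Prop := ∀ (tokens : List String) (start_index : Int) (max_len : Int) (phrases : List String), Dom_get_phrase tokens start_index max_len phrases → Pre_get_phrase tokens start_index max_len phrases → Spec_get_phrase tokens start_index max_len phrases (get_phrase tokens start_index max_len phrases)

-- ===== LEMMAS AND PROOFS =====

-- pvBest n is the largest l in [2, n] whose space-joined slice of length l is in phrases (0 if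
-- none): A reaches it scanning lengths downward, B scanning upward.
def pvBest (tokens : List String) (s : Int) (phrases : List String) : Nat → Int
  | 0 => 0
  | 1 => 0
  | (n+2) =>
    if PySem.Str.join " " (PySem.List.slice tokens (some s) (some (s + ((n : Int) + 2)))) ∈ phrases
    then ((n : Int) + 2) else pvBest tokens s phrases (n+1)

-- B's ascending recorder: process lengths j, j+1, …, j+n-1, keeping the last match over b.
def pvUp (tokens : List String) (s : Int) (phrases : List String) : Nat → Nat → Int → Int
  | _, 0, b => b
  | j, (n+1), b =>
    pvUp tokens s phrases (j+1) n
      (if PySem.Str.join " " (PySem.List.slice tokens (some s) (some (s + (j : Int)))) ∈ phrases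
       then (j : Int) else b)

-- common shape of both results given the selected length b
def pvOut (tokens : List String) (s : Int) (phrases : List String) (b : Int) : String × Int :=
  if b ≠ 0 then
    (PySem.Str.join "_" (PySem.List.slice tokens (some s) (some (s + b))), b)
  else ((PySem.List.pyGet? tokens s).getD "", 1)

-- A's loop over range(max_len), entered at index = m - n (lengths n, n-1, …, 1 still to try)
lemma A_char (tokens : List String) (s : Int) (phrases : List String) (m : Int) :
    ∀ n : Nat, 1 ≤ n →
    getPhraseLoopA tokens s m phrases (PySem.List.pyRange (m - (n : Int)) m 1) =
      pvOut tokens s phrases (pvBest tokens s phrases n) := by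
  intro n
  induction n using Nat.twoStepInduction with
  | zero => omega
  | one =>
    intro _
    rw [PySem.List.pyRange_one_cons (by omega), PySem.List.pyRange_one_eq_nil (by omega)]
    rw [getPhraseLoopA]
    simp only [pvBest, pvOut]
    rw [if_pos (by push_cast; ring)]
    simp
  | more k _ ih =>
    intro _
    rw [PySem.List.pyRange_one_cons (by push_cast; omega)]
    rw [getPhraseLoopA]
    have hpl : m - (m - ((k + 2 : Nat) : Int)) = ((k : Int) + 2) := by push_cast; ring
    rw [hpl]
    rw [if_neg (by omega)]
    by_cases hmem : PySem.Str.join " "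
        (PySem.List.slice tokens (some s) (some (s + ((k : Int) + 2)))) ∈ phrases
    · rw [if_pos hmem]
      rw [pvBest, if_pos hmem, pvOut, if_pos (by omega : ((k : Int) + 2) ≠ 0)]
    · rw [if_neg hmem]
      rw [pvBest, if_neg hmem]
      have harg : m - ((k + 2 : Nat) : Int) + 1 = m - ((k + 1 : Nat) : Int) := by push_cast; ring
      rw [harg]
      exact ih (by omega)

-- B's fold over the lengths j, j+1, …, j+n-1 still to scan
lemma B_fold (tokens : List String) (s : Int) (phrases : List String) :
    ∀ (n j : Nat) (b : Int),
    (PySem.List.pyRange (j : Int) ((j : Int) + (n : Int)) 1).foldl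
      (fun best l =>
        if PySem.Str.join " " (PySem.List.slice tokens (some s) (some (s + l))) ∈ phrases
        then l else best)
      b
    = pvUp tokens s phrases j n b := by
  intro n
  induction n with
  | zero =>
    intro j b
    rw [PySem.List.pyRange_one_eq_nil (by omega)]
    simp [pvUp]
  | succ n ih =>
    intro j b
    rw [PySem.List.pyRange_one_cons (by push_cast; omega)]
    rw [List.foldl_cons]
    have hrange : PySem.List.pyRange ((j : Int) + 1) ((j : Int) + ((n : Nat) + 1 : Nat)) 1
        = PySem.List.pyRange (((j+1 : Nat) : Int)) (((j+1 : Nat) : Int) + (n : Int)) 1 := by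
      congr 1 <;> push_cast <;> ring
    rw [hrange, ih (j+1)]
    conv_rhs => rw [pvUp]

lemma up_last (tokens : List String) (s : Int) (phrases : List String) : ∀ (n j : Nat) (b : Int),
    pvUp tokens s phrases j (n+1) b =
      if PySem.Str.join " "
          (PySem.List.slice tokens (some s) (some (s + ((j + n : Nat) : Int)))) ∈ phrases
      then ((j + n : Nat) : Int)
      else pvUp tokens s phrases j n b := by
  intro n
  induction n with
  | zero => intro j b; simp [pvUp]
  | succ n ih =>
    intro j b
    rw [pvUp, ih (j+1)]
    conv_rhs => rw [pvUp]
    have e : j + 1 + n = j + (n+1) := by omega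
    rw [e]

lemma best_eq_up (tokens : List String) (s : Int) (phrases : List String) : ∀ k : Nat,
    pvUp tokens s phrases 2 k 0 = pvBest tokens s phrases (k+1) := by
  intro k
  induction k with
  | zero => simp [pvUp, pvBest]
  | succ k ih =>
    rw [up_last, ih]
    rw [pvBest]
    have e1 : ((2 + k : Nat) : Int) = ((k : Int) + 2) := by push_cast; ring
    rw [e1]

lemma B_char (tokens : List String) (s : Int) (phrases : List String) (m : Int) (mn : Nat)
    (hm : m = (mn : Int)) (hmn : 1 ≤ mn) :
    get_phrase_alt tokens s m phrases = pvOut tokens s phrases (pvBest tokens s phrases mn) := by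
  subst hm
  rw [get_phrase_alt]
  have hrange : PySem.List.pyRange 2 ((mn : Int) + 1) 1
      = PySem.List.pyRange ((2 : Nat) : Int) (((2 : Nat) : Int) + ((mn - 1 : Nat) : Int)) 1 := by
    congr 1
    omega
  rw [hrange, B_fold tokens s phrases (mn - 1) 2 0, best_eq_up]
  have hk : mn - 1 + 1 = mn := by omega
  rw [hk, pvOut]

-- ===== VERDICT (by name: the statement is the Claim_ definition above) =====
theorem get_phrase_spec : Claim_equal_get_phrase := by
  intro tokens s m phrases _ hpre
  obtain ⟨hm1, _⟩ := hpre
  unfold Spec_get_phrase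
  have hA : get_phrase tokens s m phrases = pvOut tokens s phrases (pvBest tokens s phrases m.toNat) := by
    rw [get_phrase]
    have h0 : (0 : Int) = m - (m.toNat : Int) := by omega
    rw [h0]
    exact A_char tokens s phrases m m.toNat (by omega)
  rw [hA, B_char tokens s phrases m m.toNat (by omega) (by omega)]
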